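-- pv_equiv track=rewrite | github.com/storkme/fucktorio | src/validate.py | _bfs_pipe_reach
-- ===== SOURCE A (Python) =====
-- from collections import defaultdict, deque
--
-- def _bfs_pipe_reach(
--     start: tuple[int, int],
--     pipe_tiles: set[tuple[int, int]],
--     ptg_pairs: dict[tuple[int, int], tuple[int, int]] | None = None,
-- ) -> set[tuple[int, int]]:
--     """BFS flood-fill through adjacent pipe tiles from start.
--
--     Also traverses pipe-to-ground tunnel connections if ptg_pairs is provided
--     (maps each pipe-to-ground position to its paired endpoint).
--     """
--     if ptg_pairs is None:
--         ptg_pairs = {}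
--
--     visited: set[tuple[int, int]] = set()
--     queue = deque([start])
--     visited.add(start)
--
--     while queue:
--         x, y = queue.popleft()
--         # Adjacent pipe connections
--         for dx, dy in [(1, 0), (-1, 0), (0, 1), (0, -1)]:
--             nb = (x + dx, y + dy)
--             if nb in pipe_tiles and nb not in visited:
--                 visited.add(nb)
--                 queue.append(nb)
--         # Pipe-to-ground tunnel connections
--         if (x, y) in ptg_pairs:
--             other = ptg_pairs[(x, y)]
--             if other not in visited:
--                 visited.add(other)
--                 queue.append(other)
--
--     return visited
-- ===== SOURCE B (Python) =====
-- def _bfs_pipe_reach(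
--     start,
--     pipe_tiles,
--     ptg_pairs=None,
-- ):
--     """Fixpoint flood-fill via successor sets: each round builds the image of the
--     whole visited set under a successor function (pipe neighbours + tunnel
--     partner), subtracts what is already visited, and stops when nothing is new."""
--     if ptg_pairs is None:
--         ptg_pairs = {}
--
--     def succs(u):
--         x, y = u
--         out = [nb for nb in ((x + 1, y), (x - 1, y), (x, y + 1), (x, y - 1))
--                if nb in pipe_tiles]
--         if u in ptg_pairs:
--             out.append(ptg_pairs[u])
--         return out
--
--     visited = {start}
--     while True:
--         fresh = {c for u in visited for c in succs(u) if c not in visited}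
--         if not fresh:
--             return visited
--         visited |= fresh
-- ===== Notes on version B (the rewrite author's own statement) =====
-- stated objective: alternative
-- what changed: Replaces the deque-driven BFS worklist with a round-based fixpoint: a successor-list function (filtered neighbour comprehension plus tunnel lookup) is mapped over the whole visited set each round, the image minus visited is unioned in, and the loop stops when the image adds nothing.
import Mathlib
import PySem

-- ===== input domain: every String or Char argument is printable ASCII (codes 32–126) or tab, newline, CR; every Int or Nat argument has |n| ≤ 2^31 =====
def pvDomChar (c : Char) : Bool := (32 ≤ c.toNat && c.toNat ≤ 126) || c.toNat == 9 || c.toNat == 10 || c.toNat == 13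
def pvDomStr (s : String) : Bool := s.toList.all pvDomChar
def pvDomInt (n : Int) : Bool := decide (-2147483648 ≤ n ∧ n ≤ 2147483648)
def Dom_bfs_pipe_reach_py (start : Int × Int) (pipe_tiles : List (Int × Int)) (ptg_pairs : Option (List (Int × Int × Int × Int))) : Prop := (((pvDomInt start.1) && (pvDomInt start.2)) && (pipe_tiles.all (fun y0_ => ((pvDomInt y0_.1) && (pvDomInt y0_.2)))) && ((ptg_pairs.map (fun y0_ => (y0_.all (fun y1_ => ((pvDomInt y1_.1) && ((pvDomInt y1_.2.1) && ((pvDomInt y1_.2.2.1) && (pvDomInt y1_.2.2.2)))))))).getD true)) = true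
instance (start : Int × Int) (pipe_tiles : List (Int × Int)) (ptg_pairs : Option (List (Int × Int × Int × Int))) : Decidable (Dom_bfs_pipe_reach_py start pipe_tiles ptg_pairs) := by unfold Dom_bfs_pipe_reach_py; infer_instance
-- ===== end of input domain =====

-- B replaces A's deque-driven BFS with a round-based fixpoint: a successor-list
-- function is mapped over the whole visited set each round and the image minus
-- visited is unioned in; objective: alternative decomposition, same exact result.

-- Shared argument decoding: the ptg dict (the Python dict arrives as a list of
-- flattened (kx, ky, vx, vy) quadruples).
def pvPtgDict (ptg_pairs : Option (List (Int × Int × Int × Int))) : PySem.Dict (Int × Int) (Int × Int) :=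
  match ptg_pairs with
  | none => PySem.Dict.empty
  | some l => PySem.Dict.ofList (l.map (fun q => ((q.1, q.2.1), (q.2.2.1, q.2.2.2))))

-- ===== PORT A =====
-- The four neighbour offsets of A's inner for-loop.
def pvDirs : List (Int × Int) := [(1, 0), (-1, 0), (0, 1), (0, -1)]

-- Body of A's while loop for one dequeued node: the for-loop over the four
-- directions followed by the tunnel lookup, updating (visited, queue).
def bfsStepA (pipe_tiles : List (Int × Int)) (ptg : PySem.Dict (Int × Int) (Int × Int))
    (vq : PySem.Set (Int × Int) × List (Int × Int)) (u : Int × Int) :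
    PySem.Set (Int × Int) × List (Int × Int) :=
  let vq := pvDirs.foldl (fun vq d =>
      let nb := (u.1 + d.1, u.2 + d.2)
      if PySem.Set.contains pipe_tiles nb && !(PySem.Set.contains vq.1 nb) then
        (PySem.Set.add vq.1 nb, vq.2 ++ [nb])
      else vq) vq
  match PySem.Dict.get? ptg u with
  | some other =>
      if !(PySem.Set.contains vq.1 other) then (PySem.Set.add vq.1 other, vq.2 ++ [other]) else vq
  | none => vq

-- A's 'while queue' loop; fuel only makes it total (it provably never runs out).
def bfsLoopA (pipe_tiles : List (Int × Int)) (ptg : PySem.Dict (Int × Int) (Int × Int)) :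
    Nat → PySem.Set (Int × Int) → List (Int × Int) → List (Int × Int)
  | 0, v, _ => v
  | _ + 1, v, [] => v
  | f + 1, v, u :: rest =>
      let vq := bfsStepA pipe_tiles ptg (v, rest) u
      bfsLoopA pipe_tiles ptg f vq.1 vq.2

def bfs_pipe_reach_py (start : Int × Int) (pipe_tiles : List (Int × Int)) (ptg_pairs : Option (List (Int × Int × Int × Int))) : List (Int × Int) :=
  let ptg := pvPtgDict ptg_pairs
  bfsLoopA pipe_tiles ptg (pipe_tiles.length + (ptg_pairs.getD []).length + 2)
    (PySem.Set.add PySem.Set.empty start) [start]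

-- ===== PORT B =====
-- B's succs(u): the neighbour comprehension filtered by pipe membership, plus
-- the tunnel partner when u is a key (Option.toList is that conditional append).
def succsB (pipe_tiles : List (Int × Int)) (ptg : PySem.Dict (Int × Int) (Int × Int))
    (u : Int × Int) : List (Int × Int) :=
  ([(u.1 + 1, u.2), (u.1 - 1, u.2), (u.1, u.2 + 1), (u.1, u.2 - 1)].filter
      (fun nb => PySem.Set.contains pipe_tiles nb))
    ++ (PySem.Dict.get? ptg u).toList

-- B's 'while True' round loop: fresh = {c for u in visited for c in succs(u)
-- if c not in visited}; fuel only makes it total (each continuing round strictly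
-- grows visited, so it provably never runs out).
def bfsLoopB (pipe_tiles : List (Int × Int)) (ptg : PySem.Dict (Int × Int) (Int × Int)) :
    Nat → PySem.Set (Int × Int) → List (Int × Int)
  | 0, v => v
  | f + 1, v =>
      let fresh := PySem.Set.ofList
        ((v.flatMap (succsB pipe_tiles ptg)).filter (fun c => !(PySem.Set.contains v c)))
      if fresh.isEmpty then v else bfsLoopB pipe_tiles ptg f (PySem.Set.update v fresh)

def bfs_pipe_reach_py_alt (start : Int × Int) (pipe_tiles : List (Int × Int)) (ptg_pairs : Option (List (Int × Int × Int × Int))) : List (Int × Int) :=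
  let ptg := pvPtgDict ptg_pairs
  bfsLoopB pipe_tiles ptg (pipe_tiles.length + (ptg_pairs.getD []).length + 2)
    (PySem.Set.add PySem.Set.empty start)

-- ===== PRECONDITION & SPEC =====
def Spec_bfs_pipe_reach_py (start : Int × Int) (pipe_tiles : List (Int × Int)) (ptg_pairs : Option (List (Int × Int × Int × Int))) (out : List (Int × Int)) : Prop := out = bfs_pipe_reach_py_alt start pipe_tiles ptg_pairs
instance (start : Int × Int) (pipe_tiles : List (Int × Int)) (ptg_pairs : Option (List (Int × Int × Int × Int))) (out : List (Int × Int)) : Decidable (Spec_bfs_pipe_reach_py start pipe_tiles ptg_pairs out) := by unfold Spec_bfs_pipe_reach_py; infer_instance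

-- ===== CLAIM (what is proved, stated in full; the proofs are below) =====
def Claim_equal_bfs_pipe_reach_py : Prop := ∀ (start : Int × Int) (pipe_tiles : List (Int × Int)) (ptg_pairs : Option (List (Int × Int × Int × Int))), Dom_bfs_pipe_reach_py start pipe_tiles ptg_pairs → Spec_bfs_pipe_reach_py start pipe_tiles ptg_pairs (bfs_pipe_reach_py start pipe_tiles ptg_pairs)

-- ===== LEMMAS AND PROOFS =====

-- Visited-only projection of one BFS node expansion (the common skeleton both
-- loops are reduced to).
def stepV (pipe_tiles : List (Int × Int)) (ptg : PySem.Dict (Int × Int) (Int × Int))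
    (v : List (Int × Int)) (u : Int × Int) : List (Int × Int) :=
  let v := pvDirs.foldl (fun v d =>
      let nb := (u.1 + d.1, u.2 + d.2)
      if PySem.Set.contains pipe_tiles nb && !(PySem.Set.contains v nb) then v ++ [nb] else v) v
  match PySem.Dict.get? ptg u with
  | some other => if !(PySem.Set.contains v other) then v ++ [other] else v
  | none => v

-- Proof-only intermediate form of one round's per-node collection (conditional
-- accumulation); B's image-filter-dedup round body is proved equal to folding it.
def bfsCollectB (pipe_tiles : List (Int × Int)) (ptg : PySem.Dict (Int × Int) (Int × Int))
    (snap : PySem.Set (Int × Int)) (acc : PySem.Set (Int × Int)) (u : Int × Int) :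
    PySem.Set (Int × Int) :=
  let acc := pvDirs.foldl (fun acc d =>
      let nb := (u.1 + d.1, u.2 + d.2)
      if PySem.Set.contains pipe_tiles nb && !(PySem.Set.contains snap nb) then
        PySem.Set.add acc nb
      else acc) acc
  match PySem.Dict.get? ptg u with
  | some other => if !(PySem.Set.contains snap other) then PySem.Set.add acc other else acc
  | none => acc

-- u is saturated in v: all of u's candidates are already in v.
def satAt (pipe_tiles : List (Int × Int)) (ptg : PySem.Dict (Int × Int) (Int × Int))
    (v : List (Int × Int)) (u : Int × Int) : Prop :=
  (∀ d ∈ pvDirs, (u.1 + d.1, u.2 + d.2) ∈ pipe_tiles → (u.1 + d.1, u.2 + d.2) ∈ v) ∧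
  (∀ o, PySem.Dict.get? ptg u = some o → o ∈ v)

-- ---- B's round body equals the collect fold ----

theorem nbrs_map_eq (u : Int × Int) :
    pvDirs.map (fun d => (u.1 + d.1, u.2 + d.2))
      = [(u.1 + 1, u.2), (u.1 - 1, u.2), (u.1, u.2 + 1), (u.1, u.2 - 1)] := by
  simp [pvDirs, sub_eq_add_neg]

theorem condfold_eq (p q : Int × Int → Bool) :
    ∀ (ns : List (Int × Int)) (acc : List (Int × Int)),
      ns.foldl (fun acc nb => if p nb && q nb then PySem.Set.add acc nb else acc) acc
        = (((ns.filter p).filter q).foldl PySem.Set.add acc)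
  | [], acc => rfl
  | nb :: ns, acc => by
    rw [List.foldl_cons, List.filter_cons]
    by_cases hp : p nb = true
    · rw [if_pos hp, List.filter_cons]
      by_cases hq : q nb = true
      · rw [if_pos hq, List.foldl_cons, if_pos (by simp [hp, hq])]
        exact condfold_eq p q ns _
      · rw [if_neg hq, if_neg (by simp [hq])]
        exact condfold_eq p q ns _
    · rw [if_neg hp, if_neg (by simp [hp])]
      exact condfold_eq p q ns _

theorem collect_as_foldl_add (pipe_tiles : List (Int × Int))
    (ptg : PySem.Dict (Int × Int) (Int × Int)) (snap acc : List (Int × Int)) (u : Int × Int) :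
    bfsCollectB pipe_tiles ptg snap acc u
      = ((succsB pipe_tiles ptg u).filter (fun c => !(PySem.Set.contains snap c))).foldl
          PySem.Set.add acc := by
  unfold bfsCollectB succsB
  have hdirs : pvDirs.foldl (fun acc d =>
      let nb := (u.1 + d.1, u.2 + d.2)
      if PySem.Set.contains pipe_tiles nb && !(PySem.Set.contains snap nb) then
        PySem.Set.add acc nb
      else acc) acc
      = ((([(u.1 + 1, u.2), (u.1 - 1, u.2), (u.1, u.2 + 1), (u.1, u.2 - 1)].filter
            (fun nb => PySem.Set.contains pipe_tiles nb)).filter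
            (fun c => !(PySem.Set.contains snap c))).foldl PySem.Set.add acc) := by
    rw [← nbrs_map_eq u, ← condfold_eq (fun nb => PySem.Set.contains pipe_tiles nb)
      (fun c => !(PySem.Set.contains snap c)) (pvDirs.map (fun d => (u.1 + d.1, u.2 + d.2))) acc]
    rw [List.foldl_map]
  rw [List.filter_append, List.foldl_append, ← hdirs]
  cases hg : PySem.Dict.get? ptg u with
  | none => simp
  | some o =>
    simp only [Option.toList_some, List.filter_cons, List.filter_nil]
    by_cases hs : o ∈ snap
    · rw [if_neg (by simpa [PySem.Set.contains] using hs),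
        if_neg (by simpa [PySem.Set.contains] using hs), List.foldl_nil]
    · rw [if_pos (by simpa [PySem.Set.contains] using hs),
        if_pos (by simpa [PySem.Set.contains] using hs), List.foldl_cons, List.foldl_nil]

theorem foldl_add_flatMap (g : Int × Int → List (Int × Int)) :
    ∀ (l acc : List (Int × Int)),
      l.foldl (fun acc u => (g u).foldl PySem.Set.add acc) acc
        = ((l.flatMap g).foldl PySem.Set.add acc)
  | [], acc => rfl
  | u :: l, acc => by
    simp only [List.foldl_cons, List.flatMap_cons, List.foldl_append]
    exact foldl_add_flatMap g l _

theorem filter_flatMap_comm (g : Int × Int → List (Int × Int)) (q : Int × Int → Bool) :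
    ∀ (l : List (Int × Int)),
      l.flatMap (fun u => (g u).filter q) = (l.flatMap g).filter q
  | [] => rfl
  | u :: l => by
    simp only [List.flatMap_cons, List.filter_append]
    rw [filter_flatMap_comm g q l]

theorem fresh_eq_collect (pipe_tiles : List (Int × Int))
    (ptg : PySem.Dict (Int × Int) (Int × Int)) (v : List (Int × Int)) :
    PySem.Set.ofList
        ((v.flatMap (succsB pipe_tiles ptg)).filter (fun c => !(PySem.Set.contains v c)))
      = v.foldl (bfsCollectB pipe_tiles ptg v) PySem.Set.empty := by
  rw [PySem.Set.ofList_eq_foldl]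
  have h1 : bfsCollectB pipe_tiles ptg v
      = fun acc u =>
          ((succsB pipe_tiles ptg u).filter (fun c => !(PySem.Set.contains v c))).foldl
            PySem.Set.add acc :=
    funext (fun acc => funext (fun u => collect_as_foldl_add pipe_tiles ptg v acc u))
  rw [h1,
    foldl_add_flatMap (fun u => (succsB pipe_tiles ptg u).filter (fun c => !(PySem.Set.contains v c))),
    filter_flatMap_comm (succsB pipe_tiles ptg) (fun c => !(PySem.Set.contains v c)) v]
  rfl

-- ---- A-side reductions to stepV ----

theorem foldV_prefix (pipe_tiles : List (Int × Int)) (u : Int × Int) :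
    ∀ (ds : List (Int × Int)) (v : List (Int × Int)),
      v <+: ds.foldl (fun v d =>
        let nb := (u.1 + d.1, u.2 + d.2)
        if PySem.Set.contains pipe_tiles nb && !(PySem.Set.contains v nb) then v ++ [nb] else v) v
  | [], v => List.prefix_refl v
  | d :: ds, v => by
    simp only [List.foldl_cons]
    refine List.IsPrefix.trans ?_ (foldV_prefix pipe_tiles u ds _)
    split <;> simp

theorem stepV_prefix (pipe_tiles : List (Int × Int)) (ptg : PySem.Dict (Int × Int) (Int × Int))
    (v : List (Int × Int)) (u : Int × Int) : v <+: stepV pipe_tiles ptg v u := by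
  unfold stepV
  refine List.IsPrefix.trans (foldV_prefix pipe_tiles u pvDirs v) ?_
  cases PySem.Dict.get? ptg u with
  | none => exact List.prefix_refl _
  | some o => simp only; split <;> simp

theorem foldPair_eq (pipe_tiles : List (Int × Int)) (u : Int × Int) :
    ∀ (ds : List (Int × Int)) (v q : List (Int × Int)),
      ds.foldl (fun vq d =>
          let nb := (u.1 + d.1, u.2 + d.2)
          if PySem.Set.contains pipe_tiles nb && !(PySem.Set.contains vq.1 nb) then
            (PySem.Set.add vq.1 nb, vq.2 ++ [nb])
          else vq) (v, q)
      = (let w := ds.foldl (fun v d =>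
            let nb := (u.1 + d.1, u.2 + d.2)
            if PySem.Set.contains pipe_tiles nb && !(PySem.Set.contains v nb) then v ++ [nb] else v) v
         (w, q ++ w.drop v.length))
  | [], v, q => by simp
  | d :: ds, v, q => by
    simp only [List.foldl_cons]
    by_cases h : (PySem.Set.contains pipe_tiles (u.1 + d.1, u.2 + d.2)
        && !(PySem.Set.contains v (u.1 + d.1, u.2 + d.2))) = true
    · have hnm : (u.1 + d.1, u.2 + d.2) ∉ v := by
        simp only [Bool.and_eq_true, Bool.not_eq_true'] at h
        simpa [PySem.Set.contains] using h.2
      simp only [h, if_pos]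
      rw [PySem.Set.add_of_not_mem hnm]
      rw [foldPair_eq pipe_tiles u ds (v ++ [(u.1 + d.1, u.2 + d.2)]) (q ++ [(u.1 + d.1, u.2 + d.2)])]
      simp only
      obtain ⟨t, ht⟩ := foldV_prefix pipe_tiles u ds (v ++ [(u.1 + d.1, u.2 + d.2)])
      refine Prod.ext rfl ?_
      simp only
      rw [← ht]
      have h1 : ((v ++ [(u.1 + d.1, u.2 + d.2)]) ++ t).drop (v ++ [(u.1 + d.1, u.2 + d.2)]).length = t :=
        List.drop_left
      have h2 : ((v ++ [(u.1 + d.1, u.2 + d.2)]) ++ t).drop v.length = [(u.1 + d.1, u.2 + d.2)] ++ t := by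
        rw [List.append_assoc, List.drop_append_of_le_length (by simp)]
        simp
      rw [h1, h2]
      simp
    · simp only [h, if_neg, Bool.false_eq_true, not_false_iff]
      exact foldPair_eq pipe_tiles u ds v q

theorem stepA_eq (pipe_tiles : List (Int × Int)) (ptg : PySem.Dict (Int × Int) (Int × Int))
    (v q : List (Int × Int)) (u : Int × Int) :
    bfsStepA pipe_tiles ptg (v, q) u
      = (stepV pipe_tiles ptg v u, q ++ (stepV pipe_tiles ptg v u).drop v.length) := by
  unfold bfsStepA stepV
  rw [foldPair_eq pipe_tiles u pvDirs v q]
  simp only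
  set w := pvDirs.foldl (fun v d =>
      let nb := (u.1 + d.1, u.2 + d.2)
      if PySem.Set.contains pipe_tiles nb && !(PySem.Set.contains v nb) then v ++ [nb] else v) v with hw
  obtain ⟨t, ht⟩ := foldV_prefix pipe_tiles u pvDirs v
  rw [← hw] at ht
  cases hg : PySem.Dict.get? ptg u with
  | none => rfl
  | some o =>
    simp only
    by_cases hm : o ∈ w
    · simp [PySem.Set.contains, hm]
    · have hc : PySem.Set.contains w o = false := by simpa [PySem.Set.contains] using hm
      simp only [hc, Bool.not_false, if_pos, PySem.Set.add_of_not_mem hm]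
      have hlen : v.length ≤ w.length := by rw [← ht]; simp
      simp [List.drop_append_of_le_length hlen]

theorem foldlV_prefix (pipe_tiles : List (Int × Int)) (ptg : PySem.Dict (Int × Int) (Int × Int)) :
    ∀ (q v : List (Int × Int)), v <+: q.foldl (stepV pipe_tiles ptg) v
  | [], v => List.prefix_refl v
  | u :: q, v =>
    List.IsPrefix.trans (stepV_prefix pipe_tiles ptg v u) (foldlV_prefix pipe_tiles ptg q _)

theorem loopA_nil (pipe_tiles : List (Int × Int)) (ptg : PySem.Dict (Int × Int) (Int × Int))
    (f : Nat) (v : List (Int × Int)) : bfsLoopA pipe_tiles ptg f v [] = v := by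
  cases f <;> rfl

theorem loopA_chunk (pipe_tiles : List (Int × Int)) (ptg : PySem.Dict (Int × Int) (Int × Int)) :
    ∀ (q extra v : List (Int × Int)) (f : Nat), q.length ≤ f →
      bfsLoopA pipe_tiles ptg f v (q ++ extra)
        = bfsLoopA pipe_tiles ptg (f - q.length) (q.foldl (stepV pipe_tiles ptg) v)
            (extra ++ (q.foldl (stepV pipe_tiles ptg) v).drop v.length)
  | [], extra, v, f, _ => by simp
  | u :: q, extra, v, f + 1, h => by
    simp only [List.cons_append, List.foldl_cons]
    show bfsLoopA pipe_tiles ptg f (bfsStepA pipe_tiles ptg (v, q ++ extra) u).1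
        (bfsStepA pipe_tiles ptg (v, q ++ extra) u).2 = _
    rw [stepA_eq]
    simp only
    have h1 : q ++ extra ++ (stepV pipe_tiles ptg v u).drop v.length
        = q ++ (extra ++ (stepV pipe_tiles ptg v u).drop v.length) := by simp
    rw [h1, loopA_chunk pipe_tiles ptg q _ _ f (by simpa using h)]
    obtain ⟨t1, ht1⟩ := stepV_prefix pipe_tiles ptg v u
    obtain ⟨t2, ht2⟩ := foldlV_prefix pipe_tiles ptg q (stepV pipe_tiles ptg v u)
    congr 1
    · simp
    · rw [← ht2, ← ht1]
      rw [List.append_assoc, List.drop_append_of_le_length (by simp), List.drop_left]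
      rw [List.append_assoc v t1 t2, List.drop_left]
      simp

-- ---- the collect fold, appended to the snapshot, is exactly a stepV fold ----

theorem collectFold_eq (pipe_tiles : List (Int × Int)) (u : Int × Int)
    (snap : List (Int × Int)) :
    ∀ (ds : List (Int × Int)) (acc : List (Int × Int)),
      snap ++ ds.foldl (fun acc d =>
          let nb := (u.1 + d.1, u.2 + d.2)
          if PySem.Set.contains pipe_tiles nb && !(PySem.Set.contains snap nb) then
            PySem.Set.add acc nb
          else acc) acc
      = ds.foldl (fun v d =>
          let nb := (u.1 + d.1, u.2 + d.2)
          if PySem.Set.contains pipe_tiles nb && !(PySem.Set.contains v nb) then v ++ [nb] else v)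
          (snap ++ acc)
  | [], acc => rfl
  | d :: ds, acc => by
    simp only [List.foldl_cons]
    set nb := (u.1 + d.1, u.2 + d.2) with hnb
    by_cases hp : nb ∈ pipe_tiles
    · by_cases hs : nb ∈ snap
      · have c1 : (PySem.Set.contains pipe_tiles nb && !(PySem.Set.contains snap nb)) = false := by
          simp [PySem.Set.contains, hs]
        have c2 : (PySem.Set.contains pipe_tiles nb && !(PySem.Set.contains (snap ++ acc) nb)) = false := by
          simp [PySem.Set.contains, hs]
        rw [c1, c2]
        simp only [Bool.false_eq_true, if_neg, not_false_iff]
        exact collectFold_eq pipe_tiles u snap ds acc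
      · have c1 : (PySem.Set.contains pipe_tiles nb && !(PySem.Set.contains snap nb)) = true := by
          simp [PySem.Set.contains, hs, hp]
        by_cases ha : nb ∈ acc
        · have c2 : (PySem.Set.contains pipe_tiles nb && !(PySem.Set.contains (snap ++ acc) nb)) = false := by
            simp [PySem.Set.contains, ha]
          rw [c1, c2]
          simp only [if_pos, Bool.false_eq_true, if_neg, not_false_iff]
          rw [PySem.Set.add_of_mem ha]
          exact collectFold_eq pipe_tiles u snap ds acc
        · have c2 : (PySem.Set.contains pipe_tiles nb && !(PySem.Set.contains (snap ++ acc) nb)) = true := by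
            simp [PySem.Set.contains, hs, hp, ha]
          rw [c1, c2]
          simp only [if_pos]
          rw [PySem.Set.add_of_not_mem ha]
          rw [collectFold_eq pipe_tiles u snap ds (acc ++ [nb])]
          simp
    · have c1 : (PySem.Set.contains pipe_tiles nb && !(PySem.Set.contains snap nb)) = false := by
        simp [PySem.Set.contains, hp]
      have c2 : (PySem.Set.contains pipe_tiles nb && !(PySem.Set.contains (snap ++ acc) nb)) = false := by
        simp [PySem.Set.contains, hp]
      rw [c1, c2]
      simp only [Bool.false_eq_true, if_neg, not_false_iff]
      exact collectFold_eq pipe_tiles u snap ds acc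

theorem collect_eq (pipe_tiles : List (Int × Int)) (ptg : PySem.Dict (Int × Int) (Int × Int))
    (snap acc : List (Int × Int)) (u : Int × Int) :
    snap ++ bfsCollectB pipe_tiles ptg snap acc u = stepV pipe_tiles ptg (snap ++ acc) u := by
  unfold bfsCollectB stepV
  have hfold := collectFold_eq pipe_tiles u snap pvDirs acc
  cases hg : PySem.Dict.get? ptg u with
  | none => simpa using hfold
  | some o =>
    set fB := pvDirs.foldl (fun acc d =>
        let nb := (u.1 + d.1, u.2 + d.2)
        if PySem.Set.contains pipe_tiles nb && !(PySem.Set.contains snap nb) then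
          PySem.Set.add acc nb
        else acc) acc with hfB
    set fV := pvDirs.foldl (fun v d =>
        let nb := (u.1 + d.1, u.2 + d.2)
        if PySem.Set.contains pipe_tiles nb && !(PySem.Set.contains v nb) then v ++ [nb] else v)
        (snap ++ acc) with hfV
    by_cases hs : o ∈ snap
    · have c1 : PySem.Set.contains snap o = true := by simpa [PySem.Set.contains] using hs
      have hmV : o ∈ fV := by
        rw [← hfold]
        exact List.mem_append_left _ hs
      have c2 : PySem.Set.contains fV o = true := by simpa [PySem.Set.contains] using hmV
      simp only [c1, c2, Bool.not_true, Bool.false_eq_true, if_neg, not_false_iff]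
      exact hfold
    · have c1 : PySem.Set.contains snap o = false := by simpa [PySem.Set.contains] using hs
      simp only [c1, Bool.not_false, if_pos]
      by_cases hb : o ∈ fB
      · have hmV : o ∈ fV := by rw [← hfold]; exact List.mem_append_right _ hb
        have c2 : PySem.Set.contains fV o = true := by simpa [PySem.Set.contains] using hmV
        simp only [c2, Bool.not_true, Bool.false_eq_true, if_neg, not_false_iff]
        rw [PySem.Set.add_of_mem hb]
        exact hfold
      · have hmV : o ∉ fV := by rw [← hfold]; simp [hs, hb]
        have c2 : PySem.Set.contains fV o = false := by simpa [PySem.Set.contains] using hmV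
        simp only [c2, Bool.not_false, if_pos]
        rw [PySem.Set.add_of_not_mem hb, ← hfold]
        simp

theorem scan_eq (pipe_tiles : List (Int × Int)) (ptg : PySem.Dict (Int × Int) (Int × Int))
    (snap : List (Int × Int)) :
    ∀ (l acc : List (Int × Int)),
      snap ++ l.foldl (bfsCollectB pipe_tiles ptg snap) acc
        = l.foldl (stepV pipe_tiles ptg) (snap ++ acc)
  | [], acc => rfl
  | u :: l, acc => by
    simp only [List.foldl_cons]
    rw [scan_eq pipe_tiles ptg snap l (bfsCollectB pipe_tiles ptg snap acc u)]
    rw [collect_eq]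

-- ---- generic facts about the conditional-append direction fold ----

theorem gfold_prefix (c : Int × Int → Bool) (n : Int × Int → Int × Int) :
    ∀ (ds : List (Int × Int)) (v : List (Int × Int)),
      v <+: ds.foldl (fun v d => if c d && !(PySem.Set.contains v (n d)) then v ++ [n d] else v) v
  | [], v => List.prefix_refl v
  | d :: ds, v => by
    simp only [List.foldl_cons]
    refine List.IsPrefix.trans ?_ (gfold_prefix c n ds _)
    split <;> simp

theorem gfold_mem (c : Int × Int → Bool) (n : Int × Int → Int × Int) :
    ∀ (ds : List (Int × Int)) (v : List (Int × Int)) (x : Int × Int),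
      x ∈ ds.foldl (fun v d => if c d && !(PySem.Set.contains v (n d)) then v ++ [n d] else v) v →
      x ∈ v ∨ ∃ d ∈ ds, x = n d ∧ c d = true
  | [], v, x, hx => Or.inl hx
  | d :: ds, v, x, hx => by
    simp only [List.foldl_cons] at hx
    rcases gfold_mem c n ds _ x hx with h | ⟨d', hd', he, hce⟩
    · by_cases hc : (c d && !(PySem.Set.contains v (n d))) = true
      · rw [if_pos hc] at h
        rcases List.mem_append.mp h with h | h
        · exact Or.inl h
        · exact Or.inr ⟨d, List.mem_cons_self, by simpa using h, (Bool.and_eq_true .. |>.mp hc).1⟩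
      · rw [if_neg hc] at h
        exact Or.inl h
    · exact Or.inr ⟨d', List.mem_cons_of_mem _ hd', he, hce⟩

theorem gfold_nodup (c : Int × Int → Bool) (n : Int × Int → Int × Int) :
    ∀ (ds : List (Int × Int)) (v : List (Int × Int)), v.Nodup →
      (ds.foldl (fun v d => if c d && !(PySem.Set.contains v (n d)) then v ++ [n d] else v) v).Nodup
  | [], v, h => h
  | d :: ds, v, h => by
    simp only [List.foldl_cons]
    refine gfold_nodup c n ds _ ?_
    by_cases hc : (c d && !(PySem.Set.contains v (n d))) = true
    · rw [if_pos hc]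
      have hnm : n d ∉ v := by
        simp only [Bool.and_eq_true, Bool.not_eq_true'] at hc
        simpa [PySem.Set.contains] using hc.2
      refine List.Nodup.append h (List.nodup_singleton _) ?_
      intro a ha hb
      simp only [List.mem_singleton] at hb
      exact hnm (hb ▸ ha)
    · rw [if_neg hc]; exact h

theorem gfold_fix (c : Int × Int → Bool) (n : Int × Int → Int × Int) :
    ∀ (ds : List (Int × Int)) (v : List (Int × Int)), (∀ d ∈ ds, c d = true → n d ∈ v) →
      ds.foldl (fun v d => if c d && !(PySem.Set.contains v (n d)) then v ++ [n d] else v) v = v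
  | [], v, _ => rfl
  | d :: ds, v, h => by
    simp only [List.foldl_cons]
    have hc : (c d && !(PySem.Set.contains v (n d))) = false := by
      by_cases hcd : c d = true
      · have : n d ∈ v := h d List.mem_cons_self hcd
        simp [PySem.Set.contains, this]
      · simp [hcd]
    rw [hc]
    simp only [Bool.false_eq_true, if_neg, not_false_iff]
    exact gfold_fix c n ds v (fun d' hd' => h d' (List.mem_cons_of_mem _ hd'))

theorem gfold_sat (c : Int × Int → Bool) (n : Int × Int → Int × Int) :
    ∀ (ds : List (Int × Int)) (v : List (Int × Int)) (d : Int × Int), d ∈ ds → c d = true →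
      n d ∈ ds.foldl (fun v d => if c d && !(PySem.Set.contains v (n d)) then v ++ [n d] else v) v
  | d' :: ds, v, d, hd, hcd => by
    simp only [List.foldl_cons]
    rcases List.mem_cons.mp hd with rfl | hd
    · have hmem : n d ∈ (if c d && !(PySem.Set.contains v (n d)) then v ++ [n d] else v) := by
        by_cases hv : n d ∈ v
        · split <;> simp [hv]
        · have hcv : PySem.Set.contains v (n d) = false := by simpa [PySem.Set.contains] using hv
          simp [hcd, hv]
      obtain ⟨t, ht⟩ := gfold_prefix c n ds (if c d && !(PySem.Set.contains v (n d)) then v ++ [n d] else v)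
      rw [← ht]
      exact List.mem_append_left _ hmem
    · exact gfold_sat c n ds _ d hd hcd

-- ---- saturation: fixpoint, monotone, established by stepV ----

theorem sat_stepV (pipe_tiles : List (Int × Int)) (ptg : PySem.Dict (Int × Int) (Int × Int))
    (v : List (Int × Int)) (u : Int × Int) (h : satAt pipe_tiles ptg v u) :
    stepV pipe_tiles ptg v u = v := by
  unfold stepV
  have hfix : pvDirs.foldl (fun v d =>
      let nb := (u.1 + d.1, u.2 + d.2)
      if PySem.Set.contains pipe_tiles nb && !(PySem.Set.contains v nb) then v ++ [nb] else v) v = v :=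
    gfold_fix (fun d => PySem.Set.contains pipe_tiles (u.1 + d.1, u.2 + d.2))
      (fun d => (u.1 + d.1, u.2 + d.2)) pvDirs v
      (fun d hd hc => h.1 d hd (by simpa [PySem.Set.contains] using hc))
  rw [hfix]
  cases hg : PySem.Dict.get? ptg u with
  | none => rfl
  | some o =>
    have : o ∈ v := h.2 o hg
    simp [PySem.Set.contains, this]

theorem sat_mono (pipe_tiles : List (Int × Int)) (ptg : PySem.Dict (Int × Int) (Int × Int))
    (v w : List (Int × Int)) (u : Int × Int) (h : satAt pipe_tiles ptg v u)
    (hvw : ∀ x ∈ v, x ∈ w) : satAt pipe_tiles ptg w u :=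
  ⟨fun d hd hp => hvw _ (h.1 d hd hp), fun o ho => hvw _ (h.2 o ho)⟩

theorem stepV_sat (pipe_tiles : List (Int × Int)) (ptg : PySem.Dict (Int × Int) (Int × Int))
    (v : List (Int × Int)) (u : Int × Int) : satAt pipe_tiles ptg (stepV pipe_tiles ptg v u) u := by
  unfold stepV
  set w := pvDirs.foldl (fun v d =>
      let nb := (u.1 + d.1, u.2 + d.2)
      if PySem.Set.contains pipe_tiles nb && !(PySem.Set.contains v nb) then v ++ [nb] else v) v with hw
  have hdirs : ∀ d ∈ pvDirs, (u.1 + d.1, u.2 + d.2) ∈ pipe_tiles → (u.1 + d.1, u.2 + d.2) ∈ w := by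
    intro d hd hp
    rw [hw]
    exact gfold_sat (fun d => PySem.Set.contains pipe_tiles (u.1 + d.1, u.2 + d.2))
      (fun d => (u.1 + d.1, u.2 + d.2)) pvDirs v d hd (by simpa [PySem.Set.contains] using hp)
  cases hg : PySem.Dict.get? ptg u with
  | none => exact ⟨hdirs, fun o ho => by rw [hg] at ho; cases ho⟩
  | some o =>
    by_cases hm : o ∈ w
    · have hc : PySem.Set.contains w o = true := by simpa [PySem.Set.contains] using hm
      simp only [hc, Bool.not_true, Bool.false_eq_true, if_neg, not_false_iff]
      exact ⟨hdirs, fun o' ho' => by rw [hg] at ho'; cases ho'; exact hm⟩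
    · have hc : PySem.Set.contains w o = false := by simpa [PySem.Set.contains] using hm
      simp only [hc, Bool.not_false, if_pos]
      refine ⟨fun d hd hp => List.mem_append_left _ (hdirs d hd hp), fun o' ho' => ?_⟩
      rw [hg] at ho'; cases ho'
      simp

theorem foldl_sat (pipe_tiles : List (Int × Int)) (ptg : PySem.Dict (Int × Int) (Int × Int)) :
    ∀ (q v : List (Int × Int)) (u : Int × Int), u ∈ q →
      satAt pipe_tiles ptg (q.foldl (stepV pipe_tiles ptg) v) u
  | u' :: q, v, u, hu => by
    simp only [List.foldl_cons]
    rcases List.mem_cons.mp hu with rfl | hu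
    · obtain ⟨t, ht⟩ := foldlV_prefix pipe_tiles ptg q (stepV pipe_tiles ptg v u)
      exact sat_mono pipe_tiles ptg _ _ u (stepV_sat pipe_tiles ptg v u)
        (fun x hx => by rw [← ht]; exact List.mem_append_left _ hx)
    · exact foldl_sat pipe_tiles ptg q _ u hu

theorem foldl_sat_skip (pipe_tiles : List (Int × Int)) (ptg : PySem.Dict (Int × Int) (Int × Int)) :
    ∀ (p q v : List (Int × Int)), (∀ u ∈ p, satAt pipe_tiles ptg v u) →
      (p ++ q).foldl (stepV pipe_tiles ptg) v = q.foldl (stepV pipe_tiles ptg) v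
  | [], q, v, _ => rfl
  | u :: p, q, v, h => by
    simp only [List.cons_append, List.foldl_cons]
    rw [sat_stepV pipe_tiles ptg v u (h u List.mem_cons_self)]
    exact foldl_sat_skip pipe_tiles ptg p q v (fun u' hu' => h u' (List.mem_cons_of_mem _ hu'))

-- ---- nodup and universe membership are preserved ----

theorem stepV_nodup (pipe_tiles : List (Int × Int)) (ptg : PySem.Dict (Int × Int) (Int × Int))
    (v : List (Int × Int)) (u : Int × Int) (h : v.Nodup) : (stepV pipe_tiles ptg v u).Nodup := by
  unfold stepV
  set w := pvDirs.foldl (fun v d =>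
      let nb := (u.1 + d.1, u.2 + d.2)
      if PySem.Set.contains pipe_tiles nb && !(PySem.Set.contains v nb) then v ++ [nb] else v) v with hw
  have hwnd : w.Nodup := by
    rw [hw]
    exact gfold_nodup (fun d => PySem.Set.contains pipe_tiles (u.1 + d.1, u.2 + d.2))
      (fun d => (u.1 + d.1, u.2 + d.2)) pvDirs v h
  cases PySem.Dict.get? ptg u with
  | none => exact hwnd
  | some o =>
    simp only
    by_cases hm : o ∈ w
    · have hc : PySem.Set.contains w o = true := by simpa [PySem.Set.contains] using hm
      simpa [hm] using hwnd
    · have hc : PySem.Set.contains w o = false := by simpa [PySem.Set.contains] using hm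
      simp only [hc, Bool.not_false, if_pos]
      refine List.Nodup.append hwnd (List.nodup_singleton _) ?_
      intro a ha hb
      simp only [List.mem_singleton] at hb
      exact hm (hb ▸ ha)

theorem foldl_nodup (pipe_tiles : List (Int × Int)) (ptg : PySem.Dict (Int × Int) (Int × Int)) :
    ∀ (q v : List (Int × Int)), v.Nodup → (q.foldl (stepV pipe_tiles ptg) v).Nodup
  | [], _, h => h
  | u :: q, v, h => foldl_nodup pipe_tiles ptg q _ (stepV_nodup pipe_tiles ptg v u h)

theorem stepV_mem (pipe_tiles : List (Int × Int)) (ptg : PySem.Dict (Int × Int) (Int × Int))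
    (v : List (Int × Int)) (u : Int × Int) (x : Int × Int) (hx : x ∈ stepV pipe_tiles ptg v u) :
    x ∈ v ∨ x ∈ pipe_tiles ∨ x ∈ PySem.Dict.values ptg := by
  unfold stepV at hx
  set w := pvDirs.foldl (fun v d =>
      let nb := (u.1 + d.1, u.2 + d.2)
      if PySem.Set.contains pipe_tiles nb && !(PySem.Set.contains v nb) then v ++ [nb] else v) v with hw
  have hwmem : ∀ y, y ∈ w → y ∈ v ∨ y ∈ pipe_tiles := by
    intro y hy
    rw [hw] at hy
    rcases gfold_mem (fun d => PySem.Set.contains pipe_tiles (u.1 + d.1, u.2 + d.2))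
        (fun d => (u.1 + d.1, u.2 + d.2)) pvDirs v y hy with h | ⟨d, _, he, hce⟩
    · exact Or.inl h
    · right
      rw [he]
      simpa [PySem.Set.contains] using hce
  cases hg : PySem.Dict.get? ptg u with
  | none =>
    simp only [hg] at hx
    rcases hwmem x hx with h | h
    · exact Or.inl h
    · exact Or.inr (Or.inl h)
  | some o =>
    have hov : o ∈ PySem.Dict.values ptg := by
      have := PySem.Dict.mem_items_of_get?_eq_some ptg hg
      simp only [PySem.Dict.values]
      exact List.mem_map.mpr ⟨(u, o), this, rfl⟩
    simp only [hg] at hx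
    by_cases hm : o ∈ w
    · have hc : PySem.Set.contains w o = true := by simpa [PySem.Set.contains] using hm
      simp only [hc, Bool.not_true, Bool.false_eq_true, if_neg, not_false_iff] at hx
      rcases hwmem x hx with h | h
      · exact Or.inl h
      · exact Or.inr (Or.inl h)
    · have hc : PySem.Set.contains w o = false := by simpa [PySem.Set.contains] using hm
      simp only [hc, Bool.not_false, if_pos] at hx
      rcases List.mem_append.mp hx with h | h
      · rcases hwmem x h with h' | h'
        · exact Or.inl h'
        · exact Or.inr (Or.inl h')
      · have : x = o := by simpa using h
        exact Or.inr (Or.inr (this ▸ hov))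

theorem foldl_mem (pipe_tiles : List (Int × Int)) (ptg : PySem.Dict (Int × Int) (Int × Int)) :
    ∀ (q v : List (Int × Int)) (x : Int × Int), x ∈ q.foldl (stepV pipe_tiles ptg) v →
      x ∈ v ∨ x ∈ pipe_tiles ∨ x ∈ PySem.Dict.values ptg
  | [], _, x, hx => Or.inl hx
  | u :: q, v, x, hx => by
    rcases foldl_mem pipe_tiles ptg q _ x hx with h | h | h
    · exact stepV_mem pipe_tiles ptg v u x h
    · exact Or.inr (Or.inl h)
    · exact Or.inr (Or.inr h)

theorem nodup_length_le (v U : List (Int × Int)) (hn : v.Nodup) (hU : ∀ x ∈ v, x ∈ U) :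
    v.length ≤ U.toFinset.card := by
  rw [← List.toFinset_card_of_nodup hn]
  exact Finset.card_le_card (fun x hx => by
    simp only [List.mem_toFinset] at *
    exact hU x hx)

theorem dict_update_size_le :
    ∀ (ps : List ((Int × Int) × (Int × Int))) (d : PySem.Dict (Int × Int) (Int × Int)),
      (PySem.Dict.update d ps).size ≤ d.size + ps.length
  | [], d => le_refl _
  | p :: ps, d => by
    have h1 := dict_update_size_le ps (d.insert p.1 p.2)
    have h2 : (d.insert p.1 p.2).size ≤ d.size + 1 := by
      rw [PySem.Dict.size_insert]
      split <;> omega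
    simp only [PySem.Dict.update, List.foldl_cons] at *
    simp only [List.length_cons]
    omega

-- The master lemma: from any intermediate state (visited v = processed p ++ queue q,
-- every processed node saturated), A's queue loop and B's round loop agree.
theorem master (pipe_tiles U : List (Int × Int)) (ptg : PySem.Dict (Int × Int) (Int × Int))
    (hpipe : ∀ x ∈ pipe_tiles, x ∈ U)
    (hvals : ∀ x ∈ PySem.Dict.values ptg, x ∈ U) :
    ∀ (g : Nat) (f : Nat) (v p q : List (Int × Int)),
      v = p ++ q →
      (∀ u ∈ p, satAt pipe_tiles ptg v u) →
      v.Nodup →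
      (∀ x ∈ v, x ∈ U) →
      U.toFinset.card + 1 ≤ g + v.length →
      U.toFinset.card ≤ f + p.length →
      bfsLoopA pipe_tiles ptg f v q = bfsLoopB pipe_tiles ptg g v := by
  intro g
  induction g with
  | zero =>
    intro f v p q hv hsat hnd hU hg hf
    exfalso
    have := nodup_length_le v U hnd hU
    omega
  | succ g ih =>
    intro f v p q hv hsat hnd hU hg hf
    have hvlen : v.length = p.length + q.length := by rw [hv]; simp
    have hcard := nodup_length_le v U hnd hU
    have hqf : q.length ≤ f := by omega
    set news := PySem.Set.ofList
        ((v.flatMap (succsB pipe_tiles ptg)).filter (fun c => !(PySem.Set.contains v c)))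
      with hnews
    have hnews2 : news = v.foldl (bfsCollectB pipe_tiles ptg v) PySem.Set.empty := by
      rw [hnews]; exact fresh_eq_collect pipe_tiles ptg v
    have hscan : v ++ news = q.foldl (stepV pipe_tiles ptg) v := by
      rw [hnews2]
      have h1 := scan_eq pipe_tiles ptg v v PySem.Set.empty
      rw [show (v ++ PySem.Set.empty : List (Int × Int)) = v by simp [PySem.Set.empty]] at h1
      have h3 := congrArg (fun l => List.foldl (stepV pipe_tiles ptg) v l) hv
      simp only at h3
      rw [h3] at h1
      rw [h1]
      exact foldl_sat_skip pipe_tiles ptg p q v hsat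
    set w := q.foldl (stepV pipe_tiles ptg) v with hwdef
    have hA : bfsLoopA pipe_tiles ptg f v q = bfsLoopA pipe_tiles ptg (f - q.length) w (w.drop v.length) := by
      have h2 := loopA_chunk pipe_tiles ptg q [] v f hqf
      simpa [← hwdef] using h2
    have hdropw : w.drop v.length = news := by
      rw [← hscan, List.drop_left]
    have hwnd : w.Nodup := by rw [hwdef]; exact foldl_nodup pipe_tiles ptg q v hnd
    have hsplit : news.Nodup ∧ ∀ x ∈ news, x ∉ v := by
      rw [← hscan] at hwnd
      rw [List.nodup_append] at hwnd
      exact ⟨hwnd.2.1, fun x hx hxv => hwnd.2.2 x hxv x hx rfl⟩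
    have hBstep : bfsLoopB pipe_tiles ptg (g + 1) v
        = if news.isEmpty then v else bfsLoopB pipe_tiles ptg g (PySem.Set.update v news) := by
      rw [bfsLoopB, ← hnews]
    by_cases hE : news.isEmpty
    · have hnil : news = [] := by simpa using hE
      have hwv : w = v := by rw [← hscan, hnil, List.append_nil]
      rw [hA, hdropw, hnil, loopA_nil, hBstep, if_pos hE, hwv]
    · have hne : news ≠ [] := by simpa using hE
      have hupd : PySem.Set.update v news = v ++ news :=
        PySem.Set.update_eq_append_of_disjoint v news hsplit.1 hsplit.2
      have hvw : v ++ news = w := hscan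
      rw [hA, hdropw, hBstep, if_neg hE, hupd, hvw]
      refine ih (f - q.length) w v news hvw.symm ?_ hwnd ?_ ?_ ?_
      · intro u hu
        rcases List.mem_append.mp (by rw [hv] at hu; exact hu) with hp | hq
        · exact sat_mono pipe_tiles ptg v w u (hsat u hp)
            (fun x hx => by rw [← hvw]; exact List.mem_append_left _ hx)
        · rw [hwdef]; exact foldl_sat pipe_tiles ptg q v u hq
      · intro x hx
        rw [hwdef] at hx
        rcases foldl_mem pipe_tiles ptg q v x hx with h | h | h
        · exact hU x h
        · exact hpipe x h
        · exact hvals x h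
      · have : v.length + 1 ≤ w.length := by
          rw [← hvw]
          have : 0 < news.length := List.length_pos_iff.mpr hne
          simp only [List.length_append]
          omega
        omega
      · omega

-- ===== VERDICT (by name: the statement is the Claim_ definition above) =====
theorem bfs_pipe_reach_py_spec : Claim_equal_bfs_pipe_reach_py := by
  intro start pipe_tiles ptg_pairs _
  unfold Spec_bfs_pipe_reach_py bfs_pipe_reach_py bfs_pipe_reach_py_alt
  simp only
  have hstart : PySem.Set.add PySem.Set.empty start = [start] := rfl
  rw [hstart]
  set ptg := pvPtgDict ptg_pairs with hptg
  set U : List (Int × Int) := start :: (pipe_tiles ++ PySem.Dict.values ptg) with hU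
  set F := pipe_tiles.length + (ptg_pairs.getD []).length + 2 with hF
  have hvlen : (PySem.Dict.values ptg).length ≤ (ptg_pairs.getD []).length := by
    rw [hptg]
    cases ptg_pairs with
    | none => simp [pvPtgDict, PySem.Dict.values, PySem.Dict.empty]
    | some l =>
      have h1 := dict_update_size_le (l.map (fun q => ((q.1, q.2.1), (q.2.2.1, q.2.2.2)))) PySem.Dict.empty
      simp only [pvPtgDict, PySem.Dict.ofList] at *
      simp only [PySem.Dict.size, PySem.Dict.empty, List.length_map] at h1
      simpa [PySem.Dict.values] using h1
  have hcard : U.toFinset.card + 1 ≤ F := by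
    have h1 : U.toFinset.card ≤ U.length := List.toFinset_card_le U
    have h2 : U.length = 1 + pipe_tiles.length + (PySem.Dict.values ptg).length := by
      simp [hU]; omega
    omega
  refine master pipe_tiles U ptg ?_ ?_ F F [start] [] [start] rfl (by simp) (by simp) ?_ ?_ ?_
  · intro x hx; rw [hU]; simp [hx]
  · intro x hx; rw [hU]; simp [hx]
  · intro x hx; simp at hx; simp [hx, hU]
  · simp only [List.length_cons, List.length_nil]
    omega
  · simp only [List.length_nil]
    omega
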